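-- pv_equiv track=rewrite | github.com/sunnytulakorn/Coding-by-Python | ComSci/Lab06_5_630510582.py | longest_digit_run
-- ===== SOURCE A (Python) =====
-- def longest_digit_run(n):
--     n != 0 # define n not 0
--     numbers = 1 # Duplicate numbers
--     result = 0 # amount duplicate numbers
--     while n > 0: # do loop when n>0
--         a = n % 10 # equation
--         b = (n % 100)//10 # equation
--         if a == b: # condition
--             numbers += 1 # have a Duplicate numbers
--         else: # other
--             numbers = 1 # return numbers to 1
--         n = n//10 # Move to next number to find a duplicate numbers
--         if numbers >= result: # condition to plus result
--             result = numbers # value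
--
--     return result # return answer
-- ===== SOURCE B (Python) =====
-- def _run(s):
--     # strip the maximal leading run, recurse on the remainder, take the max
--     if s == "":
--         return 0
--     k = 1
--     while k < len(s) and s[k] == s[0]:
--         k += 1
--     return max(k, _run(s[k:]))
--
-- def longest_digit_run(n):
--     if n <= 0:
--         return 0
--     return _run(str(n))
-- ===== Notes on version B (the rewrite author's own statement) =====
-- stated objective: alternative
-- what changed: B replaces A's iterative little-endian digit loop with a running counter/best pair (% and // per step) by a recursive divide-and-strip on str(n): each call measures the maximal leading run of equal characters, recurses on the remaining suffix, and returns the max of the run lengths.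
import Mathlib
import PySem

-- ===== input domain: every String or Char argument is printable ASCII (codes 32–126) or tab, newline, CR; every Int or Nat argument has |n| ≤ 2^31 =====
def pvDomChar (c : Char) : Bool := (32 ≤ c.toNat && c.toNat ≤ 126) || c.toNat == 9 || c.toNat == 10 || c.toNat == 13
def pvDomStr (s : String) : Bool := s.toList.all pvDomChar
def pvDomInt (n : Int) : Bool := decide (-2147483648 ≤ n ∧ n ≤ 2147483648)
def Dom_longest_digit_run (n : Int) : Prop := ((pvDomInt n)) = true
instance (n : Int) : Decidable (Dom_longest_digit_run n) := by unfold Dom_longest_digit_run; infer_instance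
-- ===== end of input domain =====

-- B replaces A's iterative digit loop (running counter/best, % and // little-endian) by a
-- recursive divide-and-strip on str(n): measure the maximal leading run, recurse on the
-- remaining suffix, return the max (alternative decomposition, same asymptotic cost).

-- ===== PORT A =====
-- termination helper for A's while-loop (cited by decreasing_by)
theorem pvLrunDec (n : Int) (h : 0 < n) : (PySem.Int.floordiv n 10).toNat < n.toNat := by
  have hn : ((n.toNat : Nat) : Int) = n := Int.toNat_of_nonneg (le_of_lt h)
  have e : PySem.Int.floordiv n 10 = ((n.toNat / 10 : Nat) : Int) := by
    unfold PySem.Int.floordiv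
    rw [← hn, Int.ofNat_fdiv]
    norm_num
  rw [e]
  simp only [Int.toNat_natCast]
  exact Nat.div_lt_self (by omega) (by omega)

def lrunLoop (n numbers result : Int) : Int :=
  if h : 0 < n then
    let a := PySem.Int.mod n 10
    let b := PySem.Int.floordiv (PySem.Int.mod n 100) 10
    let numbers' := if a == b then numbers + 1 else 1
    let n' := PySem.Int.floordiv n 10
    let result' := if numbers' ≥ result then numbers' else result
    lrunLoop n' numbers' result'
  else result
termination_by n.toNat
decreasing_by exact pvLrunDec n h

def longest_digit_run (n : Int) : Int := lrunLoop n 1 0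

-- ===== PORT B =====
-- the inner while-loop of _run: number of leading characters equal to c (counted one by one)
def countLead (c : Char) : List Char → Nat
  | [] => 0
  | x :: r => if x == c then 1 + countLead c r else 0

-- _run: k = 1 + leading run of s[0] in the tail; recurse on s[k:]; max of the two
def lrB : List Char → Int
  | [] => 0
  | c :: rest =>
      let cl := countLead c rest
      max ((1 + cl : Nat) : Int) (lrB (rest.drop cl))
termination_by l => l.length
decreasing_by
  simp only [List.length_drop, List.length_cons]
  omega

def longest_digit_run_alt (n : Int) : Int :=
  if n ≤ 0 then 0
  else lrB (PySem.Int.toStr n).toList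

-- ===== PRECONDITION & SPEC =====
def Spec_longest_digit_run (n : Int) (out : Int) : Prop := out = longest_digit_run_alt n
instance (n : Int) (out : Int) : Decidable (Spec_longest_digit_run n out) := by unfold Spec_longest_digit_run; infer_instance

-- ===== CLAIM (what is proved, stated in full; the proofs are below) =====
def Claim_equal_longest_digit_run : Prop := ∀ (n : Int), Dom_longest_digit_run n → Spec_longest_digit_run n (longest_digit_run n)

-- ===== LEMMAS AND PROOFS =====

theorem beqComm {α : Type} [BEq α] [LawfulBEq α] (a b : α) : (a == b) = (b == a) := by
  by_cases h : a = b
  · subst h; rfl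
  · simp [h, Ne.symm h]

-- adjacency booleans of a list (x_i == x_{i+1})
def adjEq {α : Type} [BEq α] : List α → List Bool
  | [] => []
  | [_] => []
  | x :: y :: r => (x == y) :: adjEq (y :: r)

-- A's comparisons on its digit list: each digit against the next one, the last against 0
def adjEqZ : List Nat → List Bool
  | [] => []
  | [d] => [d == 0]
  | d :: e :: r => (d == e) :: adjEqZ (e :: r)

-- canonical fold computing the longest block of `true`s
def tfold : List Bool → Nat → Nat → Nat
  | [], _, best => best
  | b :: bs, cur, best =>
      let cur' := if b then cur + 1 else 0
      tfold bs cur' (max best cur')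

theorem tfold_cons (b : Bool) (bs : List Bool) (c m : Nat) :
    tfold (b :: bs) c m = tfold bs (if b then c + 1 else 0) (max m (if b then c + 1 else 0)) := rfl

def tmax (bs : List Bool) : Nat := tfold bs 0 0

-- abstract version of A's loop over the digit list (little-endian)
def afoldD : List Nat → Int → Int → Int
  | [], _, result => result
  | d :: ds, numbers, result =>
      let numbers' := if d == ds.headD 0 then numbers + 1 else 1
      let result' := if numbers' ≥ result then numbers' else result
      afoldD ds numbers' result'

-- A's loop over the comparison booleans
def afoldB : List Bool → Int → Int → Int
  | [], _, result => result
  | b :: bs, numbers, result =>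
      let numbers' := if b then numbers + 1 else 1
      let result' := if numbers' ≥ result then numbers' else result
      afoldB bs numbers' result'

theorem afoldB_cons (b : Bool) (bs : List Bool) (numbers result : Int) :
    afoldB (b :: bs) numbers result =
      afoldB bs (if b then numbers + 1 else 1)
        (if (if b then numbers + 1 else 1) ≥ result then (if b then numbers + 1 else 1) else result) := rfl

-- big-endian decimal digit characters, as produced by Nat.toDigits 10
def digBE (m : Nat) : List Char :=
  if _h : m < 10 then [Nat.digitChar m]
  else digBE (m / 10) ++ [Nat.digitChar (m % 10)]
termination_by m
decreasing_by exact Nat.div_lt_self (by omega) (by omega)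

-- ---- Nat.toDigits characterization ----

theorem toDigitsCore_eq_digBE : ∀ (f m : Nat) (l : List Char), m < f →
    Nat.toDigitsCore 10 f m l = digBE m ++ l := by
  intro f
  induction f with
  | zero => intro m l h; omega
  | succ f ih =>
    intro m l h
    rw [Nat.toDigitsCore]
    by_cases h0 : m / 10 = 0
    · have hm : m < 10 := by omega
      simp only [h0, if_true]
      conv_rhs => rw [digBE]
      rw [dif_pos hm]
      have : m % 10 = m := Nat.mod_eq_of_lt hm
      simp [this]
    · have hm : ¬ m < 10 := by omega
      simp only [h0, if_false]
      rw [ih (m / 10) _ (by omega)]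
      conv_rhs => rw [digBE]
      rw [dif_neg hm]
      simp

theorem toChars_pos (n : Int) (h : 0 < n) :
    PySem.Int.toChars n = digBE n.toNat := by
  unfold PySem.Int.toChars
  rw [if_neg (by omega)]
  show Nat.toDigitsCore 10 (n.toNat + 1) n.toNat [] = digBE n.toNat
  rw [toDigitsCore_eq_digBE _ _ _ (Nat.lt_succ_self _)]
  simp

theorem digBE_eq_digits : ∀ (m : Nat), 0 < m →
    digBE m = ((Nat.digits 10 m).reverse).map Nat.digitChar := by
  intro m
  induction m using Nat.strong_induction_on with
  | _ m ih =>
    intro h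
    rw [digBE]
    by_cases hm : m < 10
    · rw [dif_pos hm]
      rw [Nat.digits_def' (by norm_num) h]
      have h0 : m / 10 = 0 := by omega
      rw [h0]
      simp [Nat.mod_eq_of_lt hm]
    · rw [dif_neg hm]
      rw [Nat.digits_def' (by norm_num) h]
      rw [ih (m / 10) (Nat.div_lt_self h (by omega)) (by omega)]
      simp

-- ---- tfold basic lemmas ----

theorem tfold_le (bs : List Bool) : ∀ c m, m ≤ tfold bs c m := by
  induction bs with
  | nil => intro c m; simp [tfold]
  | cons b bs ih =>
    intro c m
    rw [tfold_cons]
    exact le_trans (le_max_left m _) (ih _ _)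

theorem tfold_append_false (bs : List Bool) : ∀ c m, tfold (bs ++ [false]) c m = tfold bs c m := by
  induction bs with
  | nil => intro c m; simp [tfold]
  | cons b bs ih =>
    intro c m
    rw [List.cons_append, tfold_cons, tfold_cons]
    exact ih _ _

-- prefix of j+1 trues gives a lower bound
theorem tfold_prefix_lb : ∀ (j : Nat) (bs : List Bool) (c m : Nat),
    List.replicate (j + 1) true <+: bs → c + j + 1 ≤ tfold bs c m := by
  intro j
  induction j with
  | zero =>
    intro bs c m hp
    obtain ⟨t, ht⟩ := hp
    subst ht
    rw [List.replicate_succ, List.replicate_zero, List.cons_append, List.nil_append, tfold_cons]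
    simp only [if_true]
    calc c + 0 + 1 ≤ max m (c + 1) := by omega
      _ ≤ _ := tfold_le _ _ _
  | succ j ih =>
    intro bs c m hp
    obtain ⟨t, ht⟩ := hp
    subst ht
    rw [List.replicate_succ, List.cons_append, tfold_cons]
    simp only [if_true]
    have hpre : List.replicate (j + 1) true <+: List.replicate (j + 1) true ++ t :=
      List.prefix_append _ _
    have := ih (List.replicate (j + 1) true ++ t) (c + 1) (max m (c + 1)) hpre
    omega

theorem tfold_mono (bs : List Bool) : ∀ (c m c' m' : Nat), c ≤ c' → m ≤ m' →
    tfold bs c m ≤ tfold bs c' m' := by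
  induction bs with
  | nil => intro c m c' m' _ h2; exact h2
  | cons b bs ih =>
    intro c m c' m' h1 h2
    rw [tfold_cons, tfold_cons]
    cases b
    · simp only [Bool.false_eq_true, if_false]
      exact ih _ _ _ _ (le_refl 0) (by omega)
    · simp only [if_true]
      exact ih _ _ _ _ (by omega) (by omega)

-- any infix of trues is a lower bound
theorem tfold_infix_lb : ∀ (bs : List Bool) (c m k : Nat),
    List.replicate k true <:+: bs → k ≤ tfold bs c m := by
  intro bs
  induction bs with
  | nil =>
    intro c m k h
    have := h.length_le
    simp at this
    simp [tfold, this]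
  | cons b bs ih =>
    intro c m k h
    rcases List.infix_cons_iff.mp h with hp | hi
    · cases k with
      | zero => exact Nat.zero_le _
      | succ j =>
        rw [List.replicate_succ] at hp
        obtain ⟨t, htt⟩ := hp
        simp only [List.cons_append, List.cons.injEq] at htt
        obtain ⟨rfl, htt⟩ := htt
        rw [tfold_cons]
        simp only [if_true]
        cases j with
        | zero =>
          calc 0 + 1 ≤ max m (c + 1) := by omega
            _ ≤ _ := tfold_le _ _ _
        | succ i =>
          have hpre : List.replicate (i + 1) true <+: bs := ⟨t, htt⟩
          have := tfold_prefix_lb i bs (c + 1) (max m (c + 1)) hpre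
          omega
    · calc k ≤ tfold bs 0 0 := ih 0 0 k hi
        _ ≤ tfold bs _ _ := tfold_mono bs 0 0 _ _ (Nat.zero_le _) (Nat.zero_le _)

-- achievement: tfold's value is m, an infix run, or c + a prefix run
theorem tfold_mem : ∀ (bs : List Bool) (c m : Nat),
    tfold bs c m = m ∨
    (∃ j, List.replicate j true <:+: bs ∧ tfold bs c m = j) ∨
    (∃ j, List.replicate j true <+: bs ∧ tfold bs c m = c + j) := by
  intro bs
  induction bs with
  | nil => intro c m; left; simp [tfold]
  | cons b bs ih =>
    intro c m
    rw [tfold_cons]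
    cases b
    · simp only [Bool.false_eq_true, if_false, Nat.max_zero]
      rcases ih 0 m with h | ⟨j, hj, hv⟩ | ⟨j, hj, hv⟩
      · left; exact h
      · right; left; exact ⟨j, List.infix_cons hj, hv⟩
      · right; left
        exact ⟨j, List.infix_cons hj.isInfix, by omega⟩
    · simp only [if_true]
      rcases ih (c + 1) (max m (c + 1)) with h | ⟨j, hj, hv⟩ | ⟨j, hj, hv⟩
      · by_cases hmc : c + 1 ≤ m
        · left; rw [h]; omega
        · right; right
          refine ⟨1, ?_, by rw [h]; omega⟩
          rw [List.replicate_succ, List.replicate_zero]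
          exact ⟨bs, rfl⟩
      · right; left; exact ⟨j, List.infix_cons hj, hv⟩
      · right; right
        refine ⟨j + 1, ?_, by omega⟩
        rw [List.replicate_succ]
        obtain ⟨t, ht⟩ := hj
        exact ⟨t, by simp [ht]⟩

theorem tmax_rep_infix (bs : List Bool) : List.replicate (tmax bs) true <:+: bs := by
  unfold tmax
  rcases tfold_mem bs 0 0 with h | ⟨j, hj, hv⟩ | ⟨j, hj, hv⟩
  · rw [h]; simp
  · rw [hv]; exact hj
  · rw [hv]; simpa using hj.isInfix

theorem tmax_reverse (bs : List Bool) : tmax bs.reverse = tmax bs := by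
  have h1 : ∀ l : List Bool, tmax l.reverse ≤ tmax l := by
    intro l
    have h := tmax_rep_infix l.reverse
    rw [← List.reverse_infix] at h
    rw [List.reverse_reverse, List.reverse_replicate] at h
    exact tfold_infix_lb _ _ _ _ h
  have h2 := h1 bs.reverse
  rw [List.reverse_reverse] at h2
  exact le_antisymm (h1 bs) h2

-- ---- adjEq lemmas ----

theorem adjEq_snoc_snoc {α : Type} [BEq α] :
    ∀ (l : List α) (x y : α), adjEq ((l ++ [x]) ++ [y]) = adjEq (l ++ [x]) ++ [x == y]
  | [], x, y => by simp [adjEq]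
  | [a], x, y => by simp [adjEq]
  | a :: b :: l, x, y => by
    have ih := adjEq_snoc_snoc (b :: l) x y
    simp only [List.cons_append] at ih ⊢
    rw [adjEq, adjEq]
    rw [← List.cons_append, ← List.cons_append] at ih
    simp only [List.cons_append] at ih
    rw [ih]
    simp

theorem adjEq_reverse {α : Type} [BEq α] [LawfulBEq α] :
    ∀ (xs : List α), adjEq xs.reverse = (adjEq xs).reverse
  | [] => by simp [adjEq]
  | [x] => by simp [adjEq]
  | x :: z :: r => by
    have ih := adjEq_reverse (z :: r)
    rw [List.reverse_cons, List.reverse_cons]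
    rw [adjEq_snoc_snoc r.reverse z x]
    rw [List.reverse_cons] at ih
    rw [ih, beqComm z x]
    rw [show adjEq (x :: z :: r) = (x == z) :: adjEq (z :: r) from rfl]
    rw [List.reverse_cons]

theorem adjEq_map_digitChar : ∀ (ds : List Nat), (∀ x ∈ ds, x < 10) →
    adjEq (ds.map Nat.digitChar) = adjEq ds
  | [] , _ => by simp [adjEq]
  | [d], _ => by simp [adjEq]
  | d :: e :: r, h => by
    have ih := adjEq_map_digitChar (e :: r) (fun x hx => h x (List.mem_cons_of_mem _ hx))
    simp only [List.map_cons] at ih ⊢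
    rw [adjEq, adjEq, ih]
    have hd : d < 10 := h d (by simp)
    have he : e < 10 := h e (by simp)
    have key : ∀ x < 10, ∀ y < 10, (Nat.digitChar x == Nat.digitChar y) = (x == y) := by decide
    rw [key d hd e he]

-- ---- connecting port A to the folds ----

theorem afoldD_eq_afoldB : ∀ (ds : List Nat) (numbers result : Int),
    afoldD ds numbers result = afoldB (adjEqZ ds) numbers result := by
  intro ds
  induction ds with
  | nil => intro numbers result; rfl
  | cons d ds ih =>
    intro numbers result
    cases ds with
    | nil => rfl
    | cons e r =>
      show afoldD (e :: r) _ _ = afoldB (adjEqZ (e :: r)) _ _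
      exact ih _ _

theorem adjEqZ_eq_adjEq : ∀ (ds : List Nat), ds ≠ [] → ds.getLast? ≠ some 0 →
    adjEqZ ds = adjEq ds ++ [false]
  | [], h, _ => absurd rfl h
  | [d], _, h => by
    have : d ≠ 0 := fun h0 => h (by simp [h0])
    simp [adjEqZ, adjEq, this]
  | d :: e :: r, _, h => by
    have ih := adjEqZ_eq_adjEq (e :: r) (by simp) (by simpa using h)
    rw [adjEqZ, adjEq, ih]
    simp

theorem lrunLoop_eq_afoldD : ∀ (m : Nat) (n : Int), 0 < n → n.toNat = m →
    ∀ (numbers result : Int),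
    lrunLoop n numbers result = afoldD (Nat.digits 10 m) numbers result := by
  intro m
  induction m using Nat.strong_induction_on with
  | _ m ih =>
    intro n hn hm numbers result
    have hncast : ((m : Nat) : Int) = n := by rw [← hm]; exact Int.toNat_of_nonneg (le_of_lt hn)
    have hm0 : 0 < m := by omega
    rw [lrunLoop, dif_pos hn]
    have hmod : PySem.Int.mod n 10 = ((m % 10 : Nat) : Int) := by
      unfold PySem.Int.mod
      rw [← hncast, Int.ofNat_fmod]
      norm_num
    have hmod100 : PySem.Int.mod n 100 = ((m % 100 : Nat) : Int) := by
      unfold PySem.Int.mod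
      rw [← hncast, Int.ofNat_fmod]
      norm_num
    have hdiv : PySem.Int.floordiv n 10 = ((m / 10 : Nat) : Int) := by
      unfold PySem.Int.floordiv
      rw [← hncast, Int.ofNat_fdiv]
      norm_num
    have hb : PySem.Int.floordiv (PySem.Int.mod n 100) 10 = ((m / 10 % 10 : Nat) : Int) := by
      rw [hmod100]
      unfold PySem.Int.floordiv
      rw [show (10 : Int) = ((10 : Nat) : Int) from by norm_num, ← Int.ofNat_fdiv]
      have : m % 100 / 10 = m / 10 % 10 := by omega
      rw [this]
    rw [Nat.digits_def' (b := 10) (by norm_num) hm0]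
    rw [afoldD]
    have hhead : (Nat.digits 10 (m / 10)).headD 0 = m / 10 % 10 := by
      by_cases h10 : m / 10 = 0
      · rw [h10]; simp
      · rw [Nat.digits_def' (b := 10) (by norm_num) (by omega)]; simp
    have hcmp : (PySem.Int.mod n 10 == PySem.Int.floordiv (PySem.Int.mod n 100) 10) =
        (m % 10 == (Nat.digits 10 (m / 10)).headD 0) := by
      rw [hmod, hb, hhead]
      apply Bool.eq_iff_iff.mpr
      simp only [beq_iff_eq]
      exact Nat.cast_inj
    simp only [hcmp, hdiv]
    by_cases h10 : m / 10 = 0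
    · rw [h10]
      simp only [Nat.digits_zero, Nat.cast_zero]
      rw [lrunLoop]
      norm_num
      rfl
    · rw [ih (m / 10) (Nat.div_lt_self hm0 (by omega)) (((m / 10 : Nat) : Int))
        (by exact_mod_cast Nat.pos_of_ne_zero h10) (Int.toNat_natCast _)]

theorem afoldB_eq_tfold : ∀ (bs : List Bool) (c m : Nat),
    afoldB bs ((c : Int) + 1) ((m : Int) + 1) = ((1 + tfold bs c m : Nat) : Int) := by
  intro bs
  induction bs with
  | nil =>
    intro c m
    show ((m : Int) + 1) = ((1 + m : Nat) : Int)
    push_cast; ring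
  | cons b bs ih =>
    intro c m
    rw [afoldB_cons, tfold_cons]
    cases b
    · simp only [Bool.false_eq_true, if_false]
      have h1 : (if (1:Int) ≥ (m:Int) + 1 then (1:Int) else ((m:Int) + 1)) = ((m : Int) + 1) := by
        split_ifs <;> omega
      rw [h1, Nat.max_zero]
      have := ih 0 m
      norm_num at this
      exact this
    · simp only [if_true]
      have h1 : ((c:Int) + 1 + 1) = (((c + 1 : Nat) : Int) + 1) := by push_cast; ring
      rw [h1]
      have h2 : (if (((c + 1 : Nat):Int) + 1) ≥ (m:Int) + 1 then (((c + 1 : Nat):Int) + 1) else ((m:Int) + 1)) =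
          (((max m (c + 1) : Nat) : Int) + 1) := by
        split_ifs <;> push_cast <;> omega
      rw [h2]
      exact ih (c + 1) (max m (c + 1))

-- first loop iteration, from (numbers, result) = (1, 0)
theorem afoldB_one_zero (b : Bool) (bs : List Bool) :
    afoldB (b :: bs) 1 0 = ((1 + tmax (b :: bs) : Nat) : Int) := by
  rw [afoldB_cons]
  unfold tmax
  rw [tfold_cons]
  cases b
  · simp only [Bool.false_eq_true, if_false]
    convert afoldB_eq_tfold bs 0 0 using 2
  · simp only [if_true]
    convert afoldB_eq_tfold bs 1 1 using 2

-- ---- connecting port B to tmax ----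

-- running tfold through a block of `true`s
theorem tfold_replicate_true : ∀ (t : Nat) (l : List Bool) (c m : Nat), c ≤ m →
    tfold (List.replicate t true ++ l) c m = tfold l (c + t) (max m (c + t)) := by
  intro t
  induction t with
  | zero =>
    intro l c m hcm
    simp only [List.replicate_zero, List.nil_append, Nat.add_zero]
    have : max m c = m := by omega
    rw [this]
  | succ t ih =>
    intro l c m hcm
    rw [List.replicate_succ, List.cons_append, tfold_cons]
    simp only [if_true]
    rw [ih l (c + 1) (max m (c + 1)) (by omega)]
    have h1 : max (max m (c + 1)) (c + 1 + t) = max m (c + (t + 1)) := by omega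
    have h2 : c + 1 + t = c + (t + 1) := by omega
    rw [h1, h2]

-- the best-so-far accumulator factors out of tfold
theorem tfold_start_max : ∀ (bs : List Bool) (c m : Nat),
    tfold bs c m = max m (tfold bs c 0) := by
  intro bs
  induction bs with
  | nil => intro c m; simp [tfold]
  | cons b bs ih =>
    intro c m
    rw [tfold_cons, tfold_cons]
    rw [ih (if b then c + 1 else 0) (max m (if b then c + 1 else 0))]
    rw [ih (if b then c + 1 else 0) (max 0 (if b then c + 1 else 0))]
    omega

theorem tmax_replicate_true (t : Nat) : tmax (List.replicate t true) = t := by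
  unfold tmax
  have := tfold_replicate_true t [] 0 0 (le_refl 0)
  simpa [tfold] using this

theorem tmax_block (t : Nat) (bs : List Bool) :
    tmax (List.replicate t true ++ false :: bs) = max t (tmax bs) := by
  unfold tmax
  rw [tfold_replicate_true t _ 0 0 (le_refl 0)]
  simp only [Nat.zero_add, Nat.max_comm 0, Nat.max_zero]
  rw [tfold_cons]
  simp only [Bool.false_eq_true, if_false, Nat.max_zero]
  rw [tfold_start_max bs 0 t]

-- decomposition of the adjacency list along the maximal leading run
theorem adjEq_lead : ∀ (rest : List Char) (c : Char),
    adjEq (c :: rest) =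
      List.replicate (countLead c rest) true ++
        (match rest.drop (countLead c rest) with
         | [] => []
         | d :: r => false :: adjEq (d :: r)) := by
  intro rest
  induction rest with
  | nil => intro c; simp [adjEq, countLead]
  | cons x r ih =>
    intro c
    rw [show adjEq (c :: x :: r) = (c == x) :: adjEq (x :: r) from rfl]
    by_cases hx : x = c
    · subst hx
      rw [show countLead x (x :: r) = 1 + countLead x r from by simp [countLead]]
      rw [show (x :: r).drop (1 + countLead x r) = r.drop (countLead x r) from by
        simp [List.drop_succ_cons, Nat.add_comm]]
      rw [ih x]
      have hrep : List.replicate (1 + countLead x r) true = true :: List.replicate (countLead x r) true := by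
        rw [Nat.add_comm]; rfl
      rw [hrep]
      simp
    · have hb : (c == x) = false := by simp [Ne.symm hx]
      have hxb : (x == c) = false := by simp [hx]
      rw [show countLead c (x :: r) = 0 from by simp [countLead, hxb]]
      simp [hb]

-- B's recursion computes 1 + the longest run of trues in the adjacency list
theorem lrB_eq_tmax : ∀ (l : List Char), l ≠ [] →
    lrB l = ((1 + tmax (adjEq l) : Nat) : Int) := by
  intro l
  induction l using lrB.induct with
  | case1 => intro hne; exact absurd rfl hne
  | case2 c rest cl hcl =>
    intro _
    rw [lrB]
    show max ((1 + countLead c rest : Nat) : Int) (lrB (rest.drop (countLead c rest))) = _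
    rw [adjEq_lead rest c]
    cases hdrop : rest.drop (countLead c rest) with
    | nil =>
      simp only [List.append_nil]
      rw [tmax_replicate_true]
      rw [show lrB [] = 0 from by rw [lrB]]
      have : (0:Int) ≤ ((1 + countLead c rest : Nat) : Int) := by positivity
      omega
    | cons d r2 =>
      have hdropcl : List.drop cl rest = d :: r2 := hdrop
      have hrec := hcl (by rw [hdropcl]; simp)
      rw [hdropcl] at hrec
      show max _ _ = ((1 + tmax (List.replicate (countLead c rest) true ++ false :: adjEq (d :: r2)) : Nat) : Int)
      rw [hrec, tmax_block]
      have hm : ∀ (a b : Nat), max ((1 + a : Nat) : Int) ((1 + b : Nat) : Int) = ((1 + max a b : Nat) : Int) := by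
        intro a b
        rcases Nat.le_total a b with h | h
        · rw [max_eq_right (by exact_mod_cast by omega), Nat.max_eq_right h]
        · rw [max_eq_left (by exact_mod_cast by omega), Nat.max_eq_left h]
      exact hm _ _

-- ===== VERDICT (by name: the statement is the Claim_ definition above) =====
theorem longest_digit_run_spec : Claim_equal_longest_digit_run := by
  intro n _
  unfold Spec_longest_digit_run longest_digit_run longest_digit_run_alt
  by_cases hn : 0 < n
  · rw [if_neg (by omega)]
    -- A side
    set m := n.toNat with hm
    have hm0 : m ≠ 0 := by omega
    rw [lrunLoop_eq_afoldD m n hn rfl, afoldD_eq_afoldB]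
    have hds_ne : Nat.digits 10 m ≠ [] := Nat.digits_ne_nil_iff_ne_zero.mpr hm0
    have hlast : (Nat.digits 10 m).getLast? ≠ some 0 := by
      rw [List.getLast?_eq_some_getLast hds_ne]
      intro hc
      exact Nat.getLast_digit_ne_zero 10 hm0 (by injection hc)
    rw [adjEqZ_eq_adjEq _ hds_ne hlast]
    -- B side: the character list
    rw [PySem.Int.toList_toStr, toChars_pos n hn, ← hm, digBE_eq_digits m (by omega)]
    have hlt : ∀ x ∈ (Nat.digits 10 m).reverse, x < 10 := by
      intro x hx
      exact Nat.digits_lt_base (by norm_num) (List.mem_reverse.mp hx)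
    have hch_ne : ((Nat.digits 10 m).reverse).map Nat.digitChar ≠ [] := by
      simp [hds_ne]
    rw [lrB_eq_tmax _ hch_ne]
    rw [adjEq_map_digitChar _ hlt, adjEq_reverse, tmax_reverse]
    -- A side: fold over adjEq ds ++ [false]
    cases hadj : adjEq (Nat.digits 10 m) ++ [false] with
    | nil => exact absurd hadj (by simp)
    | cons b bs =>
      rw [afoldB_one_zero b bs, ← hadj]
      rw [show tmax (adjEq (Nat.digits 10 m) ++ [false]) = tmax (adjEq (Nat.digits 10 m)) from
        tfold_append_false _ 0 0]
  · rw [lrunLoop, dif_neg hn, if_pos (by omega)]
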